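-- pv_equiv track=rewrite | github.com/y-martin/pkg-python3-mikrotik-swos | mikrotik_swos/utils.py | decode_listofflags
-- ===== SOURCE A (Python) =====
-- def decode_listofflags(s, zfill=0):
--     flags = []
--
--     if len(s) == 0:
--         return flags
--
--     # list is reversed (example port1 is last item)
--     flags_str = bin(int(s, 16))[2:]
--     if zfill > 0:
--         flags_str = flags_str.zfill(zfill)
--
--     flags_list = list(flags_str)
--     i = len(flags_list)
--     while i:
--         flags.append(int(flags_list[i-1]))
--         i -= 1
--     return flags
-- ===== SOURCE B (Python) =====
-- def decode_listofflags(s, zfill=0):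
--     if len(s) == 0:
--         return []
--     n = int(s, 16)
--     width = max(n.bit_length(), 1, zfill)
--     return [(n >> i) & 1 for i in range(width)]
-- ===== Notes on version B (the rewrite author's own statement) =====
-- stated objective: idiomatic
-- what changed: Replaces the bin()-string construction, zfill padding and index-reversal while-loop with direct integer bit extraction: [(n >> i) & 1 for i in range(max(n.bit_length(), 1, zfill))].
import Mathlib
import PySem

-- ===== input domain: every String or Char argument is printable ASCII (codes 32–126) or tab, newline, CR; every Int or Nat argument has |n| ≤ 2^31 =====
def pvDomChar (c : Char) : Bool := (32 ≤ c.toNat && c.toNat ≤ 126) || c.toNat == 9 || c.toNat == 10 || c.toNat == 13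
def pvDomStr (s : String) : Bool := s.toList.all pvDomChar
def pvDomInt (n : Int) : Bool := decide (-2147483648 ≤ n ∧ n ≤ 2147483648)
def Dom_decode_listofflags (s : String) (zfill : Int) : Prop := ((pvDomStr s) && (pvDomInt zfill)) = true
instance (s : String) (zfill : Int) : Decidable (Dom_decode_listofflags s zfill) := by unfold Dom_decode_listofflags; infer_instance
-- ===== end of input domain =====

-- B replaces A's bin()-string building, zfill padding and index-reversal while-loop by direct
-- integer bit extraction over range(max(bit_length, 1, zfill)) — same return value, no strings.

-- ===== PORT A =====
-- the while loop: i counts down from len(flags_list) to 1, appending int(flags_list[i-1]);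
-- getD is exact here (the index is always in range); int(c) is PySem.Int.ofChars? [c],
-- .getD 0 totalizes the ValueError case (a non-digit char), which Pre_ excludes.
def decodeLoopA (flags_list : List Char) : Nat → List Int → List Int
  | 0, flags => flags
  | i+1, flags => decodeLoopA flags_list i (flags ++ [(PySem.Int.ofChars? [flags_list.getD i '0']).getD 0])

def decode_listofflags (s : String) (zfill : Int) : List Int :=
  let flags : List Int := []
  if PySem.Str.len s = 0 then flags
  else
    match PySem.Int.ofStrBase? s 16 with
    | none => flags   -- int(s, 16) raises ValueError: excluded by Pre_
    | some n =>
      let flags_str := PySem.List.slice (PySem.Int.toBinChars0b n) (some 2) none   -- bin(n)[2:]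
      let flags_str := if zfill > 0 then PySem.Chars.zfill flags_str zfill else flags_str
      let flags_list := flags_str
      decodeLoopA flags_list flags_list.length flags

-- ===== PORT B =====
def decode_listofflags_alt (s : String) (zfill : Int) : List Int :=
  if PySem.Str.len s = 0 then []
  else
    match PySem.Int.ofStrBase? s 16 with
    | none => []   -- int(s, 16) raises ValueError: excluded by Pre_
    | some n =>
      let width := max (max ((PySem.Int.bitLength n : Int)) 1) zfill
      (PySem.List.pyRange 0 width 1).map (fun i => PySem.Int.band (n >>> i.toNat) 1)

-- ===== PRECONDITION & SPEC =====
-- A raises ValueError exactly when s is non-empty and is not a valid base-16 literal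
-- (int(s, 16) fails) or parses to a negative number (int is then applied to the 'b' of '-0b…');
-- Pre_ admits everything else: the empty string and every non-negative hex literal.
def Pre_decode_listofflags (s : String) (zfill : Int) : Prop :=
  s = "" ∨ ((PySem.Int.ofStrBase? s 16).any (fun n => decide (0 ≤ n))) = true
instance (s : String) (zfill : Int) : Decidable (Pre_decode_listofflags s zfill) := by
  unfold Pre_decode_listofflags; infer_instance

def pvWitness_decode_listofflags : String × Int := ("1f", 8)

def Spec_decode_listofflags (s : String) (zfill : Int) (out : List Int) : Prop := out = decode_listofflags_alt s zfill
instance (s : String) (zfill : Int) (out : List Int) : Decidable (Spec_decode_listofflags s zfill out) := by unfold Spec_decode_listofflags; infer_instance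

-- ===== CLAIM (what is proved, stated in full; the proofs are below) =====
def Claim_equal_decode_listofflags : Prop := ∀ (s : String) (zfill : Int), Dom_decode_listofflags s zfill → Pre_decode_listofflags s zfill → Spec_decode_listofflags s zfill (decode_listofflags s zfill)

-- ===== LEMMAS AND PROOFS =====

-- int(c) for a single char, as A's loop computes it
def charIntPV (c : Char) : Int := (PySem.Int.ofChars? [c]).getD 0

-- bit i of m, as B computes it
def bitPV (m : Nat) (i : Nat) : Int := PySem.Int.band ((m : Int) >>> i) 1

theorem decodeLoopA_eq (cs : List Char) :
    ∀ (k : Nat) (acc : List Int), k ≤ cs.length →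
      decodeLoopA cs k acc = acc ++ ((cs.take k).reverse.map charIntPV) := by
  intro k
  induction k with
  | zero => intro acc _; simp [decodeLoopA]
  | succ k ih =>
    intro acc hk
    have hklt : k < cs.length := by omega
    have ht : cs.take (k+1) = cs.take k ++ [cs[k]] := by
      rw [List.take_add_one, List.getElem?_eq_getElem hklt]; rfl
    have hg : cs.getD k '0' = cs[k] := by
      simp [List.getD, List.getElem?_eq_getElem hklt]
    rw [decodeLoopA, ih _ (by omega), ht, hg, List.reverse_append, List.reverse_singleton,
      List.singleton_append, List.map_cons, List.append_assoc, List.singleton_append]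
    rfl

theorem bitPV_succ (m i : Nat) : bitPV m (i+1) = bitPV (m/2) i := by
  unfold bitPV
  have h1 : ((m:Int) >>> (i+1)) = (((m >>> (i+1) : Nat)) : Int) := by simp [Int.natCast_shiftRight]
  have h2 : (((m/2 : Nat) : Int) >>> i) = ((((m/2) >>> i : Nat)) : Int) := by
    simp [Int.natCast_shiftRight]
  rw [h1, h2]
  congr 2
  rw [show i + 1 = 1 + i by omega, Nat.shiftRight_add, Nat.shiftRight_one]

theorem bitPV_high (m i : Nat) (h : m < 2 ^ i) : bitPV m i = 0 := by
  unfold bitPV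
  have h1 : ((m:Int) >>> i) = ((m >>> i : Nat) : Int) := by simp [Int.natCast_shiftRight]
  rw [h1, Nat.shiftRight_eq_div_pow, Nat.div_eq_of_lt h]
  decide

-- A's reversed binary digits are exactly B's LSB-first bits
theorem digits_reverse_eq_bits (m : Nat) :
    (Nat.toDigits 2 m).reverse.map charIntPV
      = (List.range (Nat.toDigits 2 m).length).map (bitPV m) := by
  induction m using Nat.strong_induction_on with
  | _ m ih =>
    by_cases hm : m < 2
    · interval_cases m <;> decide
    · rw [Nat.toDigits_eq_if (by norm_num)]
      simp only [if_neg hm]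
      have hrec := ih (m/2) (by omega)
      have hmod : charIntPV (Nat.digitChar (m % 2)) = ((m % 2 : Nat) : Int) := by
        have : m % 2 = 0 ∨ m % 2 = 1 := by omega
        rcases this with h | h <;> rw [h] <;> decide
      have hbit0 : bitPV m 0 = ((m % 2 : Nat) : Int) := by
        unfold bitPV
        simp [PySem.Int.band_one]
      rw [List.reverse_append, List.length_append]
      simp only [List.reverse_singleton, List.singleton_append, List.map_cons,
        List.length_singleton]
      rw [show (Nat.toDigits 2 (m/2)).length + 1 = ((Nat.toDigits 2 (m/2)).length) + 1 from rfl,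
        List.range_succ_eq_map]
      simp only [List.map_cons, List.map_map]
      rw [hmod, hrec, ← hbit0]
      congr 1
      apply List.map_congr_left
      intro i _
      simp [Function.comp, Nat.succ_eq_add_one, bitPV_succ]

theorem length_toDigits_two (m : Nat) :
    (Nat.toDigits 2 m).length = max (PySem.Int.bitLength (m : Int)) 1 := by
  rcases Nat.eq_zero_or_pos m with h | h
  · subst h; decide
  · have hbl1 : 1 ≤ PySem.Int.bitLength (m : Int) := by
      by_contra hc
      have h0 : PySem.Int.bitLength (m : Int) = 0 := by omega
      have := PySem.Int.lt_two_pow_bitLength (m : Int)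
      rw [h0] at this
      simp [Int.natAbs_natCast] at this
      omega
    have hle : (Nat.toDigits 2 m).length ≤ PySem.Int.bitLength (m : Int) := by
      rw [Nat.length_toDigits_le_iff (by norm_num) (by omega)]
      have := PySem.Int.lt_two_pow_bitLength (m : Int)
      simpa using this
    have hge : PySem.Int.bitLength (m : Int) ≤ (Nat.toDigits 2 m).length := by
      by_contra hc
      push_neg at hc
      have hlow := PySem.Int.two_pow_bitLength_le (m : Int) (by positivity)
      simp only [Int.natAbs_natCast] at hlow
      have hlen : (Nat.toDigits 2 m).length ≤ PySem.Int.bitLength (m : Int) - 1 := by omega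
      rw [Nat.length_toDigits_le_iff (by norm_num) (by
        have := Nat.length_toDigits_pos (b := 2) (n := m); omega)] at hlen
      omega
    omega

theorem head_toDigits_not_sign (m : Nat) (c : Char) (rest : List Char)
    (h : Nat.toDigits 2 m = c :: rest) : ¬ (c = '+' ∨ c = '-') := by
  have hc : c.isDigit = true :=
    Nat.isDigit_of_mem_toDigits (b := 2) (n := m) (by norm_num) (by norm_num)
      (by rw [h]; exact List.mem_cons_self)
  rintro (rfl | rfl) <;> exact absurd hc (by decide)

-- the padded digit string, reversed and int-mapped, equals B's bits over the padded width
theorem padded_eq_bits (m p : Nat) :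
    (List.replicate p '0' ++ Nat.toDigits 2 m).reverse.map charIntPV
      = (List.range ((Nat.toDigits 2 m).length + p)).map (bitPV m) := by
  rw [List.reverse_append, List.map_append, digits_reverse_eq_bits, List.range_add,
    List.map_append]
  congr 1
  have hlt : ∀ i, (Nat.toDigits 2 m).length ≤ i → bitPV m i = 0 := by
    intro i hi
    apply bitPV_high
    have hm : m < 2 ^ (Nat.toDigits 2 m).length :=
      (Nat.length_toDigits_le_iff (b := 2) (n := m) (by norm_num)
        Nat.length_toDigits_pos).mp le_rfl
    calc m < 2 ^ (Nat.toDigits 2 m).length := hm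
      _ ≤ 2 ^ i := Nat.pow_le_pow_right (by norm_num) hi
  rw [List.map_map]
  have : ∀ k ∈ List.range p, (bitPV m ∘ fun j => (Nat.toDigits 2 m).length + j) k = (0 : Int) := by
    intro k _
    simp only [Function.comp]
    exact hlt _ (by omega)
  rw [List.map_congr_left this]
  simp only [List.reverse_replicate, List.map_replicate, List.map_const', List.length_range]
  rw [show charIntPV '0' = 0 from by decide]

-- A's whole loop on the (possibly padded) digit string, as B's bit list
theorem A_side (m p : Nat) :
    decodeLoopA (List.replicate p '0' ++ Nat.toDigits 2 m)
      (List.replicate p '0' ++ Nat.toDigits 2 m).length []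
      = (List.range ((Nat.toDigits 2 m).length + p)).map (bitPV m) := by
  rw [decodeLoopA_eq _ _ _ le_rfl, List.take_length, List.nil_append, padded_eq_bits]

-- B's comprehension over range(width), reduced to Nat range and bitPV
theorem B_side (m Wn : Nat) :
    (PySem.List.pyRange 0 (Wn : Int) 1).map
        (fun i => PySem.Int.band (((m : Int)) >>> i.toNat) 1)
      = (List.range Wn).map (bitPV m) := by
  rw [PySem.List.pyRange_zero_nat, List.map_map]
  apply List.map_congr_left
  intro k _
  simp [bitPV]

theorem decode_listofflags_spec : Claim_equal_decode_listofflags := by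
  intro s z hdom hpre
  unfold Spec_decode_listofflags decode_listofflags decode_listofflags_alt
  by_cases hlen : PySem.Str.len s = 0
  · have hs : s = "" := by
      have h := hlen
      simp [pysem] at h
      cases s
      simp_all
    subst hs
    rfl
  · simp only [if_neg hlen]
    rcases hpre with rfl | hp
    · exact absurd (by decide : PySem.Str.len "" = 0) hlen
    · cases ho : PySem.Int.ofStrBase? s 16 with
      | none => simp [ho] at hp
      | some n =>
        rw [ho] at hp
        simp only [Option.any_some, decide_eq_true_eq] at hp
        obtain ⟨m, rfl⟩ : ∃ m : Nat, n = ↑m := ⟨n.toNat, (Int.toNat_of_nonneg hp).symm⟩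
        have hbin : PySem.Int.toBinChars0b ((m : Nat) : Int) = '0' :: 'b' :: Nat.toDigits 2 m := by
          simp [PySem.Int.toBinChars0b]
        have hbase : PySem.List.slice (PySem.Int.toBinChars0b ((m : Nat) : Int)) (some 2) none
            = Nat.toDigits 2 m := by
          rw [hbin]
          exact (PySem.List.slice_from _ (by norm_num)).trans rfl
        simp only [hbase]
        have hL1 : 1 ≤ (Nat.toDigits 2 m).length := Nat.length_toDigits_pos
        have hW : max (max ((PySem.Int.bitLength ((m : Nat) : Int) : Int)) 1) z
            = max (((Nat.toDigits 2 m).length : Int)) z := by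
          rw [length_toDigits_two m, Nat.cast_max, Nat.cast_one]
        rw [hW]
        by_cases hz : z ≤ ((Nat.toDigits 2 m).length : Int)
        · have hchars : (if z > 0 then PySem.Chars.zfill (Nat.toDigits 2 m) z
              else Nat.toDigits 2 m) = Nat.toDigits 2 m := by
            split_ifs with h
            · unfold PySem.Chars.zfill
              rw [if_pos hz]
            · rfl
          rw [hchars, max_eq_left hz, B_side]
          have := A_side m 0
          simpa using this
        · push_neg at hz
          have hz0 : 0 < z := by
            have : (1 : Int) ≤ ((Nat.toDigits 2 m).length : Int) := by exact_mod_cast hL1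
            omega
          obtain ⟨c, rest, hcr⟩ : ∃ c rest, Nat.toDigits 2 m = c :: rest := by
            cases hD : Nat.toDigits 2 m with
            | nil => rw [hD] at hL1; simp at hL1
            | cons c rest => exact ⟨c, rest, rfl⟩
          have hpad : PySem.Chars.zfill (Nat.toDigits 2 m) z
              = List.replicate (z.toNat - (Nat.toDigits 2 m).length) '0' ++ Nat.toDigits 2 m := by
            unfold PySem.Chars.zfill
            rw [if_neg (by omega)]
            rw [hcr]
            simp only [if_neg (head_toDigits_not_sign m c rest hcr)]
          rw [if_pos hz0, hpad, max_eq_right (le_of_lt hz)]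
          conv_rhs => rw [show z = ((z.toNat : Nat) : Int) from by omega, B_side]
          have hsum : (Nat.toDigits 2 m).length + (z.toNat - (Nat.toDigits 2 m).length)
              = z.toNat := by omega
          rw [A_side m (z.toNat - (Nat.toDigits 2 m).length), hsum]
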